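-- pv_equiv track=rewrite | github.com/ParasharaRamesh/DSA-Prep | datastructures/Difference Arrays.py | apply_updates_using_diff_array
-- ===== SOURCE A (Python) =====
-- def apply_updates_using_diff_array(original_arr, updates):
--     """
--     Model A: Transform the array into its difference representation,
--     apply updates, and then reconstruct it.
--     """
--     n = len(original_arr)
--     if n == 0: return []
--
--     # 1. Create the difference array from the original data
--     # diff[i] = A[i] - A[i-1]
--     diff = [0] * n
--     diff[0] = original_arr[0]
--     for i in range(1, n):
--         diff[i] = original_arr[i] - original_arr[i-1]
--
--     # 2. Apply updates in O(1)
--     for L, R, v in updates: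
--         diff[L] += v
--         if R + 1 < n:
--             diff[R + 1] -= v
--
--     # 3. Restore the original array using prefix sums (Telescoping sum)
--     # The first element is already correct, we build the rest
--     for i in range(1, n):
--         diff[i] = diff[i] + diff[i-1]
--
--     return diff
-- ===== SOURCE B (Python) =====
-- def apply_updates_using_diff_array(original_arr, updates):
--     """
--     Model B: no difference array -- apply each update directly with slice
--     assignments: add v to the whole suffix from L, subtract v from the
--     suffix from R + 1.
--     """
--     result = list(original_arr)
--     for L, R, v in updates:
--         result[L:] = [x + v for x in result[L:]]
--         result[R + 1:] = [x - v for x in result[R + 1:]]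
--     return result
-- ===== Notes on version B (the rewrite author's own statement) =====
-- stated objective: simpler
-- what changed: B abandons the difference-array/prefix-sum representation: it copies the input and applies each update (L, R, v) directly with two slice assignments, adding v to the whole suffix result[L:] and subtracting v from the suffix result[R+1:], which is exactly what A's two O(1) diff-array writes denote.
import Mathlib
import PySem

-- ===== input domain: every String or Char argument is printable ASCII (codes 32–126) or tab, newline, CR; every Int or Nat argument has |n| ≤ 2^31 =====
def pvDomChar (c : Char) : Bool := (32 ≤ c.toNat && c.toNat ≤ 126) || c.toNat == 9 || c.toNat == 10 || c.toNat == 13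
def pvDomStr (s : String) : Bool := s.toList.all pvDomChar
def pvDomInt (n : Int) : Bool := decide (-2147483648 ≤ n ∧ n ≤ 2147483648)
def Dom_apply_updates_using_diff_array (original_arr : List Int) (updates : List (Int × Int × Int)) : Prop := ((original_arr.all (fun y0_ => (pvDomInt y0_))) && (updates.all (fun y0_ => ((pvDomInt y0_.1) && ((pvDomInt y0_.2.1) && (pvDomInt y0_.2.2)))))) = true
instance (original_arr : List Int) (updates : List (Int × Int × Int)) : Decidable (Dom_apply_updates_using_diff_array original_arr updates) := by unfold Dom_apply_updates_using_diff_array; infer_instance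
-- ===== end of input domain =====

-- B drops the difference-array/prefix-sum machinery and applies each update directly to a
-- copy of the array with two slice assignments (+v on the suffix result[L:], -v on the
-- suffix result[R+1:]): a simpler, shorter direct implementation (not faster: O(n) per
-- update instead of O(1)).

-- ===== PORT A =====
-- one update step of A's loop "for L, R, v in updates: diff[L] += v; if R+1 < n: diff[R+1] -= v"
def pvAStep (n : Int) (d : List Int) (u : Int × Int × Int) : List Int :=
  let d1 := PySem.List.pySetD d u.1 (PySem.List.pyGetD d u.1 0 + u.2.2)
  if u.2.1 + 1 < n then
    PySem.List.pySetD d1 (u.2.1 + 1) (PySem.List.pyGetD d1 (u.2.1 + 1) 0 - u.2.2)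
  else d1

def apply_updates_using_diff_array (original_arr : List Int) (updates : List (Int × Int × Int)) : List Int :=
  let n : Int := original_arr.length
  if n = 0 then []
  else
    -- diff = [0]*n; diff[0] = original_arr[0]
    let diff : List Int := PySem.List.pySetD (List.replicate original_arr.length 0) 0
      (PySem.List.pyGetD original_arr 0 0)
    -- for i in range(1, n): diff[i] = original_arr[i] - original_arr[i-1]
    let diff := (PySem.List.pyRange 1 n 1).foldl
      (fun d i => PySem.List.pySetD d i
        (PySem.List.pyGetD original_arr i 0 - PySem.List.pyGetD original_arr (i - 1) 0)) diff
    -- for L, R, v in updates: …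
    let diff := updates.foldl (pvAStep n) diff
    -- for i in range(1, n): diff[i] = diff[i] + diff[i-1]
    (PySem.List.pyRange 1 n 1).foldl
      (fun d i => PySem.List.pySetD d i
        (PySem.List.pyGetD d i 0 + PySem.List.pyGetD d (i - 1) 0)) diff

-- ===== PORT B =====
-- one update of B's loop; the full-tail slice assignment "result[L:] = [x + v for x in
-- result[L:]]" replaces exactly the tail result[L:], so it is ported exactly as
-- result[:L] ++ (new tail); same for result[R+1:].
def pvBStep (res : List Int) (u : Int × Int × Int) : List Int :=
  let res1 := PySem.List.slice res none (some u.1)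
      ++ (PySem.List.slice res (some u.1) none).map (fun x => x + u.2.2)
  PySem.List.slice res1 none (some (u.2.1 + 1))
      ++ (PySem.List.slice res1 (some (u.2.1 + 1)) none).map (fun x => x - u.2.2)

def apply_updates_using_diff_array_alt (original_arr : List Int) (updates : List (Int × Int × Int)) : List Int :=
  updates.foldl pvBStep original_arr

-- ===== PRECONDITION & SPEC =====
-- Pre_ excludes exactly the inputs on which A raises IndexError: a nonempty array together
-- with some update whose L is outside [-n, n) or whose R+1 is below -n (A indexes its
-- internal diff array with them); A returns normally on every input Pre_ admits.
def Pre_apply_updates_using_diff_array (original_arr : List Int) (updates : List (Int × Int × Int)) : Prop :=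
  original_arr = [] ∨ ∀ u ∈ updates,
    -(original_arr.length : Int) ≤ u.1 ∧ u.1 < (original_arr.length : Int) ∧
    -(original_arr.length : Int) ≤ u.2.1 + 1
instance (original_arr : List Int) (updates : List (Int × Int × Int)) : Decidable (Pre_apply_updates_using_diff_array original_arr updates) := by unfold Pre_apply_updates_using_diff_array; infer_instance

def pvWitness_apply_updates_using_diff_array : List Int × (List (Int × Int × Int)) := ([1, 2, 3], [(0, 1, 5)])

def Spec_apply_updates_using_diff_array (original_arr : List Int) (updates : List (Int × Int × Int)) (out : List Int) : Prop := out = apply_updates_using_diff_array_alt original_arr updates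
instance (original_arr : List Int) (updates : List (Int × Int × Int)) (out : List Int) : Decidable (Spec_apply_updates_using_diff_array original_arr updates out) := by unfold Spec_apply_updates_using_diff_array; infer_instance

-- ===== CLAIM (what is proved, stated in full; the proofs are below) =====
def Claim_equal_apply_updates_using_diff_array : Prop := ∀ (original_arr : List Int) (updates : List (Int × Int × Int)), Dom_apply_updates_using_diff_array original_arr updates → Pre_apply_updates_using_diff_array original_arr updates → Spec_apply_updates_using_diff_array original_arr updates (apply_updates_using_diff_array original_arr updates)

-- ===== LEMMAS AND PROOFS =====

-- prefix sums with a running accumulator: psumAux a l = [a + sum of first (i+1) elements of l]_i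
def psumAux (a : Int) : List Int → List Int
  | [] => []
  | x :: xs => (a + x) :: psumAux (a + x) xs

-- difference list: diffAux p l = [l[0] - p, l[1] - l[0], …]
def diffAux (p : Int) : List Int → List Int
  | [] => []
  | x :: xs => (x - p) :: diffAux x xs

-- closed form of one suffix update of B: add v to every element from index a on
def pvSuf (a : Nat) (v : Int) (xs : List Int) : List Int :=
  xs.take a ++ (xs.drop a).map (· + v)

theorem psumAux_length (a : Int) (l : List Int) : (psumAux a l).length = l.length := by
  induction l generalizing a with
  | nil => rfl
  | cons x xs ih => simp [psumAux, ih]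

theorem diffAux_length (p : Int) (l : List Int) : (diffAux p l).length = l.length := by
  induction l generalizing p with
  | nil => rfl
  | cons x xs ih => simp [diffAux, ih]

theorem psumAux_diffAux (a : Int) (l : List Int) : psumAux a (diffAux a l) = l := by
  induction l generalizing a with
  | nil => rfl
  | cons x xs ih => simp [diffAux, psumAux, ih]

theorem psumAux_getD (a : Int) (l : List Int) (i : Nat) (hi : i < l.length) :
    (psumAux a l).getD i 0 = a + (l.take (i + 1)).sum := by
  induction l generalizing a i with
  | nil => simp at hi
  | cons x xs ih =>
    cases i with
    | zero => simp [psumAux]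
    | succ j =>
      simp only [psumAux, List.getD_cons_succ, List.take_succ_cons, List.sum_cons]
      rw [ih (a + x) j (by simpa using hi)]
      ring

theorem psumAux_concat (a : Int) (l : List Int) (x : Int) :
    psumAux a (l ++ [x]) = psumAux a l ++ [a + l.sum + x] := by
  induction l generalizing a with
  | nil => simp [psumAux]
  | cons y ys ih => simp [psumAux, ih]; ring_nf

theorem diffAux_getD (p : Int) (l : List Int) (i : Nat) (hi : i < l.length) :
    (diffAux p l).getD i 0 = l.getD i 0 - (if i = 0 then p else l.getD (i - 1) 0) := by
  induction l generalizing p i with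
  | nil => simp at hi
  | cons x xs ih =>
    cases i with
    | zero => simp [diffAux]
    | succ j =>
      simp only [diffAux, List.getD_cons_succ]
      rw [ih x j (by simpa using hi)]
      cases j with
      | zero => simp
      | succ k => simp

theorem sum_take_set (l : List Int) (j : Nat) (x : Int) (m : Nat) (hj : j < l.length) :
    ((l.set j x).take m).sum = (l.take m).sum + (if j < m then x - l.getD j 0 else 0) := by
  induction l generalizing j m with
  | nil => simp at hj
  | cons a tl ih =>
    cases j with
    | zero =>
      cases m with
      | zero => simp
      | succ k => simp [List.set_cons_zero]; ring
    | succ s =>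
      cases m with
      | zero => simp
      | succ k =>
        simp only [List.set_cons_succ, List.take_succ_cons, List.sum_cons, List.getD_cons_succ]
        rw [ih s k (by simpa using hj)]
        by_cases h : s < k <;> simp [h] <;> ring

theorem pvExtGetD (l1 l2 : List Int) (h : l1.length = l2.length)
    (hg : ∀ i, i < l1.length → l1.getD i 0 = l2.getD i 0) : l1 = l2 := by
  apply List.ext_getElem h
  intro i h1 h2
  have := hg i h1
  rwa [List.getD_eq_getElem l1 0 h1, List.getD_eq_getElem l2 0 h2] at this

theorem length_pvSuf (a : Nat) (v : Int) (xs : List Int) : (pvSuf a v xs).length = xs.length := by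
  simp [pvSuf]; omega

theorem getD_pvSuf (a : Nat) (v : Int) (xs : List Int) (i : Nat) (hi : i < xs.length) :
    (pvSuf a v xs).getD i 0 = xs.getD i 0 + (if a ≤ i then v else 0) := by
  have hl : (pvSuf a v xs).length = xs.length := length_pvSuf a v xs
  rw [List.getD_eq_getElem _ 0 (by omega), List.getD_eq_getElem _ 0 hi]
  by_cases h : i < (xs.take a).length
  · have ha : ¬ a ≤ i := by simp at h; omega
    simp only [pvSuf]
    rw [List.getElem_append_left h]
    simp [ha]
  · have ht : (xs.take a).length = a := by simp at h ⊢; omega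
    have ha : a ≤ i := by omega
    simp only [pvSuf]
    rw [List.getElem_append_right (by omega)]
    simp only [List.getElem_map, List.getElem_drop, ht, ha, if_true]
    congr 2
    omega

theorem set_append_len (P D' : List Int) (y x : Int) :
    (P ++ y :: D').set P.length x = P ++ x :: D' := by
  induction P with
  | nil => rfl
  | cons p ps ih => simp only [List.cons_append, List.length_cons, List.set_cons_succ, ih]

theorem set_append_eq (P D' : List Int) (y x : Int) (k : Nat) (hk : P.length = k) :
    (P ++ y :: D').set k x = P ++ x :: D' := by
  subst hk; exact set_append_len P D' y x

theorem length_pvAStep (n : Int) (d : List Int) (u : Int × Int × Int) :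
    (pvAStep n d u).length = d.length := by
  unfold pvAStep
  split <;> simp [PySem.List.length_pySetD]

theorem pvFoldALen (ups : List (Int × Int × Int)) (n : Int) : ∀ (d : List Int),
    (ups.foldl (pvAStep n) d).length = d.length := by
  induction ups with
  | nil => intro d; rfl
  | cons u us ih => intro d; rw [List.foldl_cons, ih, length_pvAStep]

theorem pvLoop1Aux (orig : List Int) (hne : orig ≠ []) (k : Nat) (h1 : 1 ≤ k)
    (hk : k ≤ orig.length) :
    (PySem.List.pyRange 1 (k : Int) 1).foldl
      (fun d i => PySem.List.pySetD d i
        (PySem.List.pyGetD orig i 0 - PySem.List.pyGetD orig (i - 1) 0))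
      (PySem.List.pySetD (List.replicate orig.length 0) 0 (PySem.List.pyGetD orig 0 0))
    = (diffAux 0 orig).take k
      ++ (PySem.List.pySetD (List.replicate orig.length 0) 0 (PySem.List.pyGetD orig 0 0)).drop k := by
  set init := PySem.List.pySetD (List.replicate orig.length 0) 0 (PySem.List.pyGetD orig 0 0) with hinit
  have hinitlen : init.length = orig.length := by
    rw [hinit, PySem.List.length_pySetD, List.length_replicate]
  induction k, h1 using Nat.le_induction with
  | base =>
    rw [show ((1 : Nat) : Int) = 1 by norm_num, PySem.List.pyRange_one_eq_nil (le_refl 1),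
        List.foldl_nil]
    obtain ⟨x, xs, rfl⟩ := List.exists_cons_of_ne_nil hne
    rw [hinit]
    rw [PySem.List.pyGetD_zero, PySem.List.pySetD_of_nonneg _ _ (by norm_num)]
    simp [diffAux, List.replicate_succ]
  | succ k hk1 ih =>
    have hkl : k < orig.length := by omega
    have hD : (diffAux 0 orig).length = orig.length := diffAux_length 0 orig
    rw [show (((k + 1 : Nat)) : Int) = (k : Int) + 1 by push_cast; ring,
        PySem.List.pyRange_one_succ_right (by exact_mod_cast hk1), List.foldl_append,
        ih (by omega)]
    simp only [List.foldl_cons, List.foldl_nil]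
    have hT : ((diffAux 0 orig).take k).length = k := by simp [hD]; omega
    rw [PySem.List.pyGetD_natCast orig k 0,
        show ((k : Int) - 1) = ((k - 1 : Nat) : Int) by omega,
        PySem.List.pyGetD_natCast orig (k - 1) 0,
        PySem.List.pySetD_natCast,
        List.drop_eq_getElem_cons (show k < init.length by omega),
        set_append_eq _ _ _ _ k hT]
    rw [List.take_succ, List.getElem?_eq_getElem (show k < (diffAux 0 orig).length by omega)]
    have hval : (diffAux 0 orig)[k] = orig.getD k 0 - orig.getD (k - 1) 0 := by
      rw [← List.getD_eq_getElem _ 0 (show k < (diffAux 0 orig).length by omega),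
          diffAux_getD 0 orig k hkl, if_neg (by omega)]
    rw [hval]
    simp [List.append_assoc]

theorem pvLoop1 (orig : List Int) (hne : orig ≠ []) :
    (PySem.List.pyRange 1 (orig.length : Int) 1).foldl
      (fun d i => PySem.List.pySetD d i
        (PySem.List.pyGetD orig i 0 - PySem.List.pyGetD orig (i - 1) 0))
      (PySem.List.pySetD (List.replicate orig.length 0) 0 (PySem.List.pyGetD orig 0 0))
    = diffAux 0 orig := by
  have h1 : 1 ≤ orig.length := List.length_pos_of_ne_nil hne
  rw [pvLoop1Aux orig hne orig.length h1 (le_refl _)]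
  have hD : (diffAux 0 orig).length = orig.length := diffAux_length 0 orig
  have hinitlen : (PySem.List.pySetD (List.replicate orig.length 0) 0
      (PySem.List.pyGetD orig 0 0)).length = orig.length := by
    rw [PySem.List.length_pySetD, List.length_replicate]
  rw [List.take_of_length_le (by omega), List.drop_eq_nil_of_le (by omega), List.append_nil]

theorem pvLoop3Aux (d : List Int) (hd : d ≠ []) (k : Nat) (h1 : 1 ≤ k) (hk : k ≤ d.length) :
    (PySem.List.pyRange 1 (k : Int) 1).foldl
      (fun l i => PySem.List.pySetD l i
        (PySem.List.pyGetD l i 0 + PySem.List.pyGetD l (i - 1) 0)) d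
    = psumAux 0 (d.take k) ++ d.drop k := by
  induction k, h1 using Nat.le_induction with
  | base =>
    rw [show ((1 : Nat) : Int) = 1 by norm_num, PySem.List.pyRange_one_eq_nil (le_refl 1),
        List.foldl_nil]
    obtain ⟨x, xs, rfl⟩ := List.exists_cons_of_ne_nil hd
    simp [psumAux]
  | succ k hk1 ih =>
    have hkl : k < d.length := by omega
    rw [show (((k + 1 : Nat)) : Int) = (k : Int) + 1 by push_cast; ring,
        PySem.List.pyRange_one_succ_right (by exact_mod_cast hk1), List.foldl_append,
        ih (by omega)]
    simp only [List.foldl_cons, List.foldl_nil]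
    have hP : (psumAux 0 (d.take k)).length = k := by
      rw [psumAux_length]; simp; omega
    have hget1 : PySem.List.pyGetD (psumAux 0 (d.take k) ++ d.drop k) (k : Int) 0 = d[k] := by
      rw [PySem.List.pyGetD_natCast, List.getD_append_right _ _ _ _ (by omega), hP,
          Nat.sub_self, List.drop_eq_getElem_cons hkl]
      rfl
    have hget2 : PySem.List.pyGetD (psumAux 0 (d.take k) ++ d.drop k) ((k : Int) - 1) 0
        = (d.take k).sum := by
      rw [show ((k : Int) - 1) = ((k - 1 : Nat) : Int) by omega, PySem.List.pyGetD_natCast,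
          List.getD_append _ _ _ _ (by omega),
          psumAux_getD 0 (d.take k) (k - 1) (by simp; omega)]
      rw [show k - 1 + 1 = k by omega, List.take_take, min_self, zero_add]
    rw [hget1, hget2, PySem.List.pySetD_natCast,
        List.drop_eq_getElem_cons hkl, set_append_eq _ _ _ _ k hP]
    rw [List.take_succ, List.getElem?_eq_getElem hkl]
    simp only [Option.toList_some, psumAux_concat]
    rw [List.append_assoc, List.singleton_append]
    have : d[k] + (d.take k).sum = 0 + (d.take k).sum + d[k] := by ring
    rw [this]

theorem pvLoop3 (n : Nat) (d : List Int) (hlen : d.length = n) (h1 : 1 ≤ n) :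
    (PySem.List.pyRange 1 (n : Int) 1).foldl
      (fun l i => PySem.List.pySetD l i
        (PySem.List.pyGetD l i 0 + PySem.List.pyGetD l (i - 1) 0)) d
    = psumAux 0 d := by
  subst hlen
  have hd : d ≠ [] := by intro h; subst h; simp at h1
  rw [pvLoop3Aux d hd d.length h1 (le_refl _), List.take_of_length_le (le_refl _),
      List.drop_eq_nil_of_le (le_refl _), List.append_nil]


-- Python indexing with a possibly negative in-range index lands at clampIdx
theorem pySetD_inrange (xs : List Int) (i : Int) (v : Int)
    (h0 : -(xs.length : Int) ≤ i) (h1 : i < (xs.length : Int)) :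
    PySem.List.pySetD xs i v = xs.set (PySem.List.clampIdx xs.length i) v := by
  rcases lt_or_ge i 0 with hi | hi
  · obtain ⟨k, rfl⟩ : ∃ k : Nat, i = -(k : Int) := ⟨(-i).toNat, by omega⟩
    simp only [PySem.List.pySetD, PySem.List.pySet?, PySem.List.pyIdx?]
    rw [if_neg (by omega), if_pos (by omega)]
    simp only [Option.map_some, Option.getD_some]
    rw [PySem.List.clampIdx_neg_natCast _ _ (by omega)]
    congr 1
    omega
  · rw [PySem.List.pySetD_of_nonneg _ _ hi]
    congr 1
    simp only [PySem.List.clampIdx]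
    split_ifs <;> omega

theorem pyGetD_inrange (xs : List Int) (i d : Int)
    (h0 : -(xs.length : Int) ≤ i) (h1 : i < (xs.length : Int)) :
    PySem.List.pyGetD xs i d = xs.getD (PySem.List.clampIdx xs.length i) d := by
  rcases lt_or_ge i 0 with hi | hi
  · obtain ⟨k, rfl⟩ : ∃ k : Nat, i = -(k : Int) := ⟨(-i).toNat, by omega⟩
    rw [PySem.List.pyGetD_neg_natCast _ _ _ (by omega) (by omega),
        PySem.List.clampIdx_neg_natCast _ _ (by omega),
        List.getD_eq_getElem _ _ (by omega)]
  · have hc : PySem.List.clampIdx xs.length i = i.toNat := by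
      simp only [PySem.List.clampIdx]
      split_ifs <;> omega
    rw [hc, PySem.List.pyGetD_eq_getElem _ _ hi h1, List.getD_eq_getElem _ _ (by omega)]

theorem slice_none_some (xs : List Int) (a : Int) :
    PySem.List.slice xs none (some a) = xs.take (PySem.List.clampIdx xs.length a) := by
  simp [PySem.List.slice]

-- one update of B in closed form: two pvSuf layers at the clamped indices
theorem pvBStep_eq (res : List Int) (u : Int × Int × Int) :
    pvBStep res u
      = pvSuf (PySem.List.clampIdx res.length (u.2.1 + 1)) (-u.2.2)
          (pvSuf (PySem.List.clampIdx res.length u.1) u.2.2 res) := by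
  obtain ⟨L, R, v⟩ := u
  simp only [pvBStep, slice_none_some, PySem.List.slice_some_none]
  rw [show res.take (PySem.List.clampIdx res.length L)
        ++ (res.drop (PySem.List.clampIdx res.length L)).map (fun x => x + v)
      = pvSuf (PySem.List.clampIdx res.length L) v res from rfl]
  rw [length_pvSuf]
  simp only [pvSuf, sub_eq_add_neg]

theorem pvBStep_nil (u : Int × Int × Int) : pvBStep [] u = [] := by
  simp [pvBStep, PySem.List.slice]

theorem foldl_pvBStep_nil (ups : List (Int × Int × Int)) : ups.foldl pvBStep [] = [] := by
  induction ups with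
  | nil => rfl
  | cons u us ih => rw [List.foldl_cons, pvBStep_nil, ih]

-- the crux: applying one update to the diff array commutes with prefix summation
theorem pvStepComm (d : List Int) (u : Int × Int × Int)
    (hL0 : -(d.length : Int) ≤ u.1) (hLn : u.1 < (d.length : Int))
    (hR : -(d.length : Int) ≤ u.2.1 + 1) :
    psumAux 0 (pvAStep (d.length : Int) d u) = pvBStep (psumAux 0 d) u := by
  obtain ⟨L, R, v⟩ := u
  simp only at hL0 hLn hR
  have hn0 : (psumAux 0 d).length = d.length := psumAux_length 0 d
  rw [pvBStep_eq, hn0]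
  set p := PySem.List.clampIdx d.length L with hp
  set q := PySem.List.clampIdx d.length (R + 1) with hq
  have hpn : p < d.length := by
    rw [hp]; simp only [PySem.List.clampIdx]; split_ifs <;> omega
  have hqn : (R + 1 < (d.length : Int)) ↔ q < d.length := by
    rw [hq]; simp only [PySem.List.clampIdx]; split_ifs <;> omega
  have hA : pvAStep (d.length : Int) d (L, R, v)
      = if q < d.length then
          (d.set p (d.getD p 0 + v)).set q ((d.set p (d.getD p 0 + v)).getD q 0 - v)
        else d.set p (d.getD p 0 + v) := by
    unfold pvAStep
    simp only
    rw [pySetD_inrange _ _ _ hL0 hLn, pyGetD_inrange _ _ _ hL0 hLn, ← hp]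
    by_cases hc : R + 1 < (d.length : Int)
    · have hlen1 : (d.set p (d.getD p 0 + v)).length = d.length := by simp
      rw [if_pos hc, if_pos (hqn.mp hc),
          pySetD_inrange _ _ _ (by rw [hlen1]; exact hR) (by rw [hlen1]; exact hc),
          pyGetD_inrange _ _ _ (by rw [hlen1]; exact hR) (by rw [hlen1]; exact hc),
          hlen1, ← hq]
    · rw [if_neg hc, if_neg (fun h => hc (hqn.mpr h))]
  rw [hA]
  have hiflen : (if q < d.length then
        (d.set p (d.getD p 0 + v)).set q ((d.set p (d.getD p 0 + v)).getD q 0 - v)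
      else d.set p (d.getD p 0 + v)).length = d.length := by
    split_ifs <;> simp
  apply pvExtGetD
  · rw [psumAux_length, hiflen, length_pvSuf, length_pvSuf, hn0]
  · intro i hi
    rw [psumAux_length, hiflen] at hi
    rw [getD_pvSuf _ _ _ i (by rw [length_pvSuf, hn0]; exact hi),
        getD_pvSuf _ _ _ i (by rw [hn0]; exact hi),
        psumAux_getD 0 d i hi]
    by_cases hc : q < d.length
    · rw [if_pos hc, psumAux_getD 0 _ i (by simp [hi]),
          sum_take_set _ _ _ _ (by simpa using hc), sum_take_set _ _ _ _ hpn]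
      have e1 : p < i + 1 ↔ p ≤ i := by omega
      have e2 : q < i + 1 ↔ q ≤ i := by omega
      by_cases c1 : p ≤ i <;> by_cases c2 : q ≤ i <;>
        simp [e1, e2, c1, c2] <;> ring
    · rw [if_neg hc, psumAux_getD 0 _ i (by simp [hi]),
          sum_take_set _ _ _ _ hpn]
      have c2 : ¬ q ≤ i := by omega
      have e1 : p < i + 1 ↔ p ≤ i := by omega
      by_cases c1 : p ≤ i <;> simp [e1, c1, c2] <;> ring

theorem pvUpdatesLoop (ups : List (Int × Int × Int)) : ∀ (d : List Int),
    (∀ u ∈ ups, -(d.length : Int) ≤ u.1 ∧ u.1 < (d.length : Int) ∧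
      -(d.length : Int) ≤ u.2.1 + 1) →
    psumAux 0 (ups.foldl (pvAStep (d.length : Int)) d) = ups.foldl pvBStep (psumAux 0 d) := by
  induction ups with
  | nil => intro d _; rfl
  | cons u ups ih =>
    intro d hb
    obtain ⟨h1, h2, h3⟩ := hb u (by simp)
    have hlen : (pvAStep (d.length : Int) d u).length = d.length := length_pvAStep _ d u
    simp only [List.foldl_cons]
    have := ih (pvAStep (d.length : Int) d u)
      (by intro w hw; rw [hlen]; exact hb w (by simp [hw]))
    rw [hlen] at this
    rw [this, pvStepComm d u h1 h2 h3]

-- ===== VERDICT (by name: the statement is the Claim_ definition above) =====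
theorem apply_updates_using_diff_array_spec : Claim_equal_apply_updates_using_diff_array := by
  intro orig ups _ hpre
  unfold Spec_apply_updates_using_diff_array
  by_cases hne : orig = []
  · subst hne
    simp [apply_updates_using_diff_array, apply_updates_using_diff_array_alt,
      foldl_pvBStep_nil]
  · have hpre' : ∀ u ∈ ups, -(orig.length : Int) ≤ u.1 ∧ u.1 < (orig.length : Int) ∧
        -(orig.length : Int) ≤ u.2.1 + 1 := by
      rcases hpre with h | h
      · exact absurd h hne
      · exact h
    have hn0 : ¬ ((orig.length : Int) = 0) := by
      have := List.length_pos_of_ne_nil hne; omega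
    simp only [apply_updates_using_diff_array, apply_updates_using_diff_array_alt]
    rw [if_neg hn0, pvLoop1 orig hne]
    have hlen2 : (ups.foldl (pvAStep ((orig.length : Int))) (diffAux 0 orig)).length
        = orig.length := by rw [pvFoldALen, diffAux_length]
    rw [pvLoop3 orig.length _ hlen2 (List.length_pos_of_ne_nil hne)]
    have hb : ∀ u ∈ ups, -(((diffAux 0 orig).length : Nat) : Int) ≤ u.1 ∧
        u.1 < (((diffAux 0 orig).length : Nat) : Int) ∧
        -(((diffAux 0 orig).length : Nat) : Int) ≤ u.2.1 + 1 := by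
      rw [diffAux_length]; exact hpre'
    have hmain := pvUpdatesLoop ups (diffAux 0 orig) hb
    rw [diffAux_length] at hmain
    rw [hmain, psumAux_diffAux]
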